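-- pv_equiv track=rewrite | github.com/AlexShkarin/pyLabLib | pylablib/core/utils/string.py | _is_string_repr
-- ===== SOURCE A (Python) =====
-- _quotation_characters="\"'"
--
-- def _is_string_repr(s):
--     quals=set()
--     p=0
--     while p<len(s):
--         c=s[p].lower()
--         if c in _quotation_characters:
--             return True
--         if c in "rb" and c not in quals:
--             quals.add(c)
--             p+=1
--         else:
--             return False
--     return False
-- ===== SOURCE B (Python) =====
-- _quotation_characters="\"'"
--
-- def _is_string_repr(s):
--     # B: declarative check — the string is a string repr iff it starts with one of
--     # the legal qualifier prefixes ("rb","br","r","b","") case-insensitively,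
--     # immediately followed by a quote character.
--     return any(
--         s[:len(p)].lower() == p
--         and len(s) > len(p)
--         and s[len(p)] in _quotation_characters
--         for p in ("rb", "br", "r", "b", "")
--     )
-- ===== Notes on version B (the rewrite author's own statement) =====
-- stated objective: simpler
-- what changed: Replaced the stateful scan (index loop with a mutable set of seen qualifiers) by a declarative any() over the five legal qualifier prefixes ('rb','br','r','b',''), each checked for a following quote.
import Mathlib
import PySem

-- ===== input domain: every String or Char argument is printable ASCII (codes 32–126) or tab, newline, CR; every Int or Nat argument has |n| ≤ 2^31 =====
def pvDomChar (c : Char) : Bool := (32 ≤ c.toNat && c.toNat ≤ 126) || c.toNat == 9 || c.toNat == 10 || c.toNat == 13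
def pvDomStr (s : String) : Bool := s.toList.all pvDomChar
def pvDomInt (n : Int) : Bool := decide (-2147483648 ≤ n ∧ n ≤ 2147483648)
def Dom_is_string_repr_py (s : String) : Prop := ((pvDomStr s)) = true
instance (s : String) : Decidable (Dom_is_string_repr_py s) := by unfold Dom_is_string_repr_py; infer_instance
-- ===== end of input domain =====

-- B replaces A's stateful index loop with a mutable qualifier set by a declarative
-- check over the five legal prefixes; same values, no speed claim.

-- ===== PORT A =====
-- A's while-loop over p with the mutable set `quals`, as structural recursion on the rest of the string
def goA : List Char → PySem.Set Char → Bool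
  | [], _ => false
  | c0 :: rest, quals =>
    let c := PySem.Chars.lowerChar c0
    if (['"', '\''].contains c) then true
    else if (['r', 'b'].contains c) && !(PySem.Set.contains quals c) then
      goA rest (PySem.Set.add quals c)
    else false

def is_string_repr_py (s : String) : Bool := goA s.toList PySem.Set.empty

-- ===== PORT B =====
-- one candidate prefix check: s[:len(p)].lower() == p and len(s) > len(p) and s[len(p)] is a quote
def altMatch (cs : List Char) (p : List Char) : Bool :=
  (PySem.Chars.lower (cs.take p.length) == p) &&
  (match cs.drop p.length with
   | q :: _ => ['"', '\''].contains q
   | [] => false)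

def is_string_repr_py_alt (s : String) : Bool :=
  [['r','b'], ['b','r'], ['r'], ['b'], ([] : List Char)].any (altMatch s.toList)

-- ===== PRECONDITION & SPEC =====
def Spec_is_string_repr_py (s : String) (out : Bool) : Prop := out = is_string_repr_py_alt s
instance (s : String) (out : Bool) : Decidable (Spec_is_string_repr_py s out) := by unfold Spec_is_string_repr_py; infer_instance

-- ===== CLAIM (what is proved, stated in full; the proofs are below) =====
def Claim_equal_is_string_repr_py : Prop := ∀ (s : String), Dom_is_string_repr_py s → Spec_is_string_repr_py s (is_string_repr_py s)

-- ===== LEMMAS AND PROOFS =====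

theorem char_eq_iff_toNat (a b : Char) : a = b ↔ a.toNat = b.toNat := by
  constructor
  · intro h; rw [h]
  · intro h; exact Char.ext (UInt32.toNat_inj.mp h)

theorem lowerChar_toNat (c : Char) :
    (PySem.Chars.lowerChar c).toNat =
      if 65 ≤ c.toNat ∧ c.toNat ≤ 90 then c.toNat + 32 else c.toNat := by
  simp only [PySem.Chars.lowerChar, PySem.Chars.isupper]
  have hA : ('A' ≤ c) ↔ (65 ≤ c.toNat) := by
    rw [Char.le_def, UInt32.le_iff_toNat_le]; rfl
  have hZ : (c ≤ 'Z') ↔ (c.toNat ≤ 90) := by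
    rw [Char.le_def, UInt32.le_iff_toNat_le]; rfl
  split_ifs with h1 h2 h2
  · have hv : Nat.isValidChar (c.toNat + 32) := Or.inl (by omega)
    simp [Char.ofNat, hv, Char.ofNatAux]
    omega
  · simp only [Bool.and_eq_true, decide_eq_true_eq, hA, hZ] at h1
    exact absurd h1 h2
  · simp only [Bool.and_eq_true, decide_eq_true_eq, hA, hZ, not_and] at h1
    exact absurd h2.2 (h1 h2.1)
  · rfl

theorem lc_dquote (c : Char) : (PySem.Chars.lowerChar c = '"') ↔ c = '"' := by
  rw [char_eq_iff_toNat, char_eq_iff_toNat (b := '"'), lowerChar_toNat]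
  have h : ('"' : Char).toNat = 34 := rfl
  rw [h]; split_ifs with hc <;> omega

theorem lc_squote (c : Char) : (PySem.Chars.lowerChar c = '\'') ↔ c = '\'' := by
  rw [char_eq_iff_toNat, char_eq_iff_toNat (b := '\''), lowerChar_toNat]
  have h : ('\'' : Char).toNat = 39 := rfl
  rw [h]; split_ifs with hc <;> omega


set_option maxHeartbeats 2000000 in
theorem goA_eq_alt (cs : List Char) :
    goA cs PySem.Set.empty = [['r','b'], ['b','r'], ['r'], ['b'], ([] : List Char)].any (altMatch cs) := by
  match cs with
  | [] => rfl
  | [c] =>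
    simp only [goA, altMatch, PySem.Set.empty, PySem.Set.contains,
      PySem.Chars.lower, List.any, List.map, List.take, List.drop, List.length]
    by_cases h1 : c = '"' <;>
    by_cases h2 : c = '\'' <;>
    by_cases h3 : PySem.Chars.lowerChar c = 'r' <;>
    by_cases h4 : PySem.Chars.lowerChar c = 'b' <;>
    simp_all [lc_dquote, lc_squote] <;>
    simp_all [PySem.Chars.lowerChar, PySem.Chars.isupper]
  | [c, d] =>
    simp only [goA, altMatch, PySem.Set.empty, PySem.Set.contains,
      PySem.Chars.lower, List.any, List.map, List.take, List.drop, List.length]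
    by_cases h1 : c = '"' <;>
    by_cases h2 : c = '\'' <;>
    by_cases h3 : PySem.Chars.lowerChar c = 'r' <;>
    by_cases h4 : PySem.Chars.lowerChar c = 'b' <;>
    by_cases g1 : d = '"' <;>
    by_cases g2 : d = '\'' <;>
    by_cases g3 : PySem.Chars.lowerChar d = 'r' <;>
    by_cases g4 : PySem.Chars.lowerChar d = 'b' <;>
    simp_all [lc_dquote, lc_squote] <;>
    simp_all [PySem.Chars.lowerChar, PySem.Chars.isupper]
  | c :: d :: e :: rest =>
    simp only [goA, altMatch, PySem.Set.empty, PySem.Set.contains,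
      PySem.Chars.lower, List.any, List.map, List.take, List.drop, List.length]
    by_cases h1 : c = '"' <;>
    by_cases h2 : c = '\'' <;>
    by_cases h3 : PySem.Chars.lowerChar c = 'r' <;>
    by_cases h4 : PySem.Chars.lowerChar c = 'b' <;>
    by_cases g1 : d = '"' <;>
    by_cases g2 : d = '\'' <;>
    by_cases g3 : PySem.Chars.lowerChar d = 'r' <;>
    by_cases g4 : PySem.Chars.lowerChar d = 'b' <;>
    by_cases k1 : e = '"' <;>
    by_cases k2 : e = '\'' <;>
    simp_all [lc_dquote, lc_squote] <;>
    simp_all [PySem.Chars.lowerChar, PySem.Chars.isupper] <;>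
    tauto

-- ===== VERDICT (by name: the statement is the Claim_ definition above) =====
theorem is_string_repr_py_spec : Claim_equal_is_string_repr_py := by
  intro s _
  unfold Spec_is_string_repr_py is_string_repr_py is_string_repr_py_alt
  exact goA_eq_alt s.toList
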